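-- pv_equiv track=rewrite | github.com/justindekock/tkinter_nba_stats_gui | src/data_handling/cleaning.py | clean_string_list
-- ===== SOURCE A (Python) =====
-- def clean_string_list(string_list):
--     clean_strings = []
--     chars = ["'", '[', ']']
--     for string in string_list:
--         for char in chars:
--             string = str(string).replace(char, '')
--         clean_strings.append(string)
--
--     return clean_strings
-- ===== SOURCE B (Python) =====
-- def clean_string_list(string_list):
--     removable = {"'", "[", "]"}
--     return [''.join(ch for ch in str(s) if ch not in removable) for s in string_list]
-- ===== Notes on version B (the rewrite author's own statement) =====
-- stated objective: idiomatic
-- what changed: Replaces the accumulator loop with three sequential str.replace scans per element by a list comprehension doing one character-by-character filtering pass per element.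
import Mathlib
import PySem

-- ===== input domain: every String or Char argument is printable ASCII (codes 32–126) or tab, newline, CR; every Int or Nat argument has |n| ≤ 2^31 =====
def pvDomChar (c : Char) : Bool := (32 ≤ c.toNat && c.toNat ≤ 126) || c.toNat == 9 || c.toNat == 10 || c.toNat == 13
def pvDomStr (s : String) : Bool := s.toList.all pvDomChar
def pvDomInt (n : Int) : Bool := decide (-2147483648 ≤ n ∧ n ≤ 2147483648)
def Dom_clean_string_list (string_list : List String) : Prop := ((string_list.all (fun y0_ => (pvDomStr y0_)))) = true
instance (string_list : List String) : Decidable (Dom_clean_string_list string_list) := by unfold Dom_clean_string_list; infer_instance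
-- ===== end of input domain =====

-- B replaces A's three sequential str.replace scans per element by a single
-- character-filtering pass per element (idiomatic; same behaviour).

-- ===== PORT A =====
def clean_string_list (string_list : List String) : List String :=
  let chars : List String := ["'", "[", "]"]
  string_list.foldl
    (fun clean_strings string =>
      clean_strings ++ [chars.foldl (fun s ch => PySem.Str.replace s ch "") string])
    []

-- ===== PORT B =====
def pvRemovable (ch : Char) : Bool := ch == '\'' || ch == '[' || ch == ']'

def clean_string_list_alt (string_list : List String) : List String :=
  string_list.map (fun s => String.ofList (s.toList.filter (fun ch => !(pvRemovable ch))))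

-- ===== PRECONDITION & SPEC =====
def Spec_clean_string_list (string_list : List String) (out : List String) : Prop := out = clean_string_list_alt string_list
instance (string_list : List String) (out : List String) : Decidable (Spec_clean_string_list string_list out) := by unfold Spec_clean_string_list; infer_instance

-- ===== CLAIM (what is proved, stated in full; the proofs are below) =====
def Claim_equal_clean_string_list : Prop := ∀ (string_list : List String), Dom_clean_string_list string_list → Spec_clean_string_list string_list (clean_string_list string_list)

-- ===== LEMMAS AND PROOFS =====

-- Chars.replace.go with a single-char pattern and empty replacement is a filter.
theorem replace_go_filter (c : Char) :
    ∀ (l acc : List Char) (fuel : Nat), l.length ≤ fuel →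
      PySem.Chars.replace.go [c] [] fuel l acc = acc.reverse ++ l.filter (fun x => x ≠ c) := by
  intro l
  induction l with
  | nil =>
      intro acc fuel _
      cases fuel <;> simp [PySem.Chars.replace.go]
  | cons h t ih =>
      intro acc fuel hlen
      cases fuel with
      | zero => simp at hlen
      | succ n =>
        simp only [PySem.Chars.replace.go]
        by_cases hc : h = c
        · subst hc
          have hp : [h].isPrefixOf (h :: t) = true := by simp [List.isPrefixOf]
          simp only [hp, if_true, List.length_cons, List.drop_succ_cons,
            List.length_nil, List.drop_zero, List.reverse_nil, List.nil_append]
          rw [ih acc n (by simpa using hlen)]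
          simp [List.filter]
        · have hp : [c].isPrefixOf (h :: t) = false := by
            simp [List.isPrefixOf]; exact fun e => (hc e.symm).elim
          rw [if_neg (by simp [hp])]
          rw [ih (h :: acc) n (by simpa using hlen)]
          simp [List.filter, hc]

theorem replace_single_filter (s : String) (c : Char) :
    (PySem.Str.replace s (String.ofList [c]) "").toList = s.toList.filter (fun x => x ≠ c) := by
  rw [PySem.Str.toList_replace]
  simp only [PySem.Chars.replace]
  have h1 : (String.ofList [c]).toList = [c] := by simp
  have h2 : ("" : String).toList = [] := by simp
  rw [if_neg (by simp [h1])]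
  rw [h1, h2, replace_go_filter c s.toList [] s.toList.length (le_refl _)]
  simp

theorem elem_clean_eq (s : String) :
    (["'", "[", "]"] : List String).foldl (fun s ch => PySem.Str.replace s ch "") s
      = String.ofList (s.toList.filter (fun ch => !(pvRemovable ch))) := by
  have h1 : ("'" : String) = String.ofList ['\''] := by decide
  have h2 : ("[" : String) = String.ofList ['['] := by decide
  have h3 : ("]" : String) = String.ofList [']'] := by decide
  apply String.ext
  show (PySem.Str.replace (PySem.Str.replace (PySem.Str.replace s "'" "") "[" "") "]" "").toList = _
  rw [h1, h2, h3, replace_single_filter, replace_single_filter, replace_single_filter,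
    List.filter_filter, List.filter_filter]
  show _ = (String.ofList _).toList
  rw [String.toList_ofList]
  apply List.filter_congr
  intro x _
  by_cases hx1 : x = '\'' <;> by_cases hx2 : x = '[' <;> by_cases hx3 : x = ']' <;>
    simp [pvRemovable, hx1, hx2, hx3]

theorem foldl_append_map {α β : Type} (f : α → β) :
    ∀ (l : List α) (acc : List β),
      l.foldl (fun r a => r ++ [f a]) acc = acc ++ l.map f := by
  intro l
  induction l with
  | nil => simp
  | cons h t ih => intro acc; simp [List.foldl, ih]

-- ===== VERDICT (by name: the statement is the Claim_ definition above) =====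
theorem clean_string_list_spec : Claim_equal_clean_string_list := by
  intro l _
  show clean_string_list l = clean_string_list_alt l
  unfold clean_string_list clean_string_list_alt
  rw [foldl_append_map]
  simp only [List.nil_append]
  apply List.map_congr_left
  intro s _
  exact elem_clean_eq s
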